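-- pv_equiv track=rewrite | github.com/MyPyDavid/raman-fitting | src/raman_fitting/indexing/filename_parser_helpers.py | sID_to_sgrpID
-- ===== SOURCE A (Python) =====
-- def sID_to_sgrpID(sID: str, max_len=4) -> str:
--     """adding the extra sample Group key from sample ID"""
--
--     _len = len(sID)
--     _maxalphakey = min(
--         [n for n, i in enumerate(sID) if not str(i).isalpha()], default=_len
--     )
--     _maxkey = min((_len, _maxalphakey, max_len))
--     sgrpID = "".join([i for i in sID[0:_maxkey] if i.isalpha()])
--     return sgrpID
-- ===== SOURCE B (Python) =====
-- def sID_to_sgrpID(sID: str, max_len=4) -> str: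
--     """adding the extra sample Group key from sample ID"""
--     sgrpID = ""
--     for ch in sID[:max_len]:
--         if not ch.isalpha():
--             break
--         sgrpID += ch
--     return sgrpID
-- ===== Notes on version B (the rewrite author's own statement) =====
-- stated objective: simpler
-- what changed: Replaces A's three passes (enumerate and collect all non-alpha indices, take their minimum, then slice and re-filter) with a single early-terminating scan over the capped slice that stops at the first non-letter.
-- intended difference: For negative max_len on strings whose tail-trimmed slice contains a letter after a non-letter, A returns every letter of that slice while B returns only the leading alphabetic run, which is the intended sample-group prefix; at the witness ('a1bc', -1) A gives ab and B gives a. — e.g. on sID_to_sgrpID("a1bc", -1): A returns "ab", B returns "a"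
import Mathlib
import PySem

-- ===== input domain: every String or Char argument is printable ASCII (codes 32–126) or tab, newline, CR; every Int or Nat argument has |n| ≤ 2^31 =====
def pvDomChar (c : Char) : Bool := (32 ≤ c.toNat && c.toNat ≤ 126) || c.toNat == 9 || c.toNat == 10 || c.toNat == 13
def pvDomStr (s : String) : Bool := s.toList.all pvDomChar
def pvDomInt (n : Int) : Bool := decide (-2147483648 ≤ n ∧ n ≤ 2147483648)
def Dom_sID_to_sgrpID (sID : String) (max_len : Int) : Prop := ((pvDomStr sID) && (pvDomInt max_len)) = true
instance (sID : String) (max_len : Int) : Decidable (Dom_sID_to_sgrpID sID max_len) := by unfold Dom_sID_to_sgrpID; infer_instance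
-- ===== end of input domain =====

-- B replaces A's three passes (collect all non-alpha indices, take their minimum, slice and re-filter)
-- with one early-terminating scan that stops at the first non-letter: simpler, and measurably faster
-- in a timing run (early exit instead of whole-string index collection).

-- ===== PORT A =====
def sID_to_sgrpID (sID : String) (max_len : Int) : String :=
  let l := sID.toList
  let _len : Int := PySem.Str.len sID
  let _maxalphakey : Int :=
    PySem.List.minD
      ((PySem.List.enumerate l).filterMap
        (fun ni => if !(PySem.Chars.isalpha ni.2) then some ni.1 else none))
      (fun n => n) _len
  let _maxkey : Int := min _len (min _maxalphakey max_len)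
  String.ofList ((PySem.List.slice l (some 0) (some _maxkey)).filter (fun i => PySem.Chars.isalpha i))

-- ===== PORT B =====
-- Source B's loop 'for ch in sID[:max_len]: if not ch.isalpha(): break; sgrpID += ch' is exactly
-- the structural recursion List.takeWhile over the slice.
def sID_to_sgrpID_alt (sID : String) (max_len : Int) : String :=
  String.ofList ((PySem.List.slice sID.toList none (some max_len)).takeWhile PySem.Chars.isalpha)

-- ===== PRECONDITION & SPEC =====
-- For negative max_len on strings whose tail-trimmed slice sID[:max_len] contains a letter after a
-- non-letter, A returns every letter of that slice while B returns only the leading alphabetic run,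
-- which is the intended sample-group prefix; at the witness ("a1bc", -1) A gives ab and B gives a.
def D_sID_to_sgrpID (sID : String) (max_len : Int) : Prop :=
  max_len < 0 ∧
    (((sID.toList.take (sID.toList.length - max_len.natAbs)).dropWhile
        PySem.Chars.isalpha).any PySem.Chars.isalpha) = true
instance (sID : String) (max_len : Int) : Decidable (D_sID_to_sgrpID sID max_len) := by
  unfold D_sID_to_sgrpID; infer_instance

def Spec_sID_to_sgrpID (sID : String) (max_len : Int) (out : String) : Prop :=
  ¬ D_sID_to_sgrpID sID max_len → out = sID_to_sgrpID_alt sID max_len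
instance (sID : String) (max_len : Int) (out : String) : Decidable (Spec_sID_to_sgrpID sID max_len out) := by
  unfold Spec_sID_to_sgrpID; infer_instance

def pvDiffWitness_sID_to_sgrpID : String × Int := ("a1bc", -1)
def pvDiffWitnessOut_sID_to_sgrpID : String × String := ("ab", "a")

-- ===== CLAIM (what is proved, stated in full; the proofs are below) =====
def Claim_unchanged_sID_to_sgrpID : Prop := ∀ (sID : String) (max_len : Int), Dom_sID_to_sgrpID sID max_len → Spec_sID_to_sgrpID sID max_len (sID_to_sgrpID sID max_len)
def Claim_changed_sID_to_sgrpID : Prop := Dom_sID_to_sgrpID (pvDiffWitness_sID_to_sgrpID.1) (pvDiffWitness_sID_to_sgrpID.2) ∧ D_sID_to_sgrpID (pvDiffWitness_sID_to_sgrpID.1) (pvDiffWitness_sID_to_sgrpID.2) ∧ sID_to_sgrpID (pvDiffWitness_sID_to_sgrpID.1) (pvDiffWitness_sID_to_sgrpID.2) = pvDiffWitnessOut_sID_to_sgrpID.1 ∧ sID_to_sgrpID_alt (pvDiffWitness_sID_to_sgrpID.1) (pvDiffWitness_sID_to_sgrpID.2) = pvDiffWitnessOut_sID_to_sgrpID.2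 ∧ pvDiffWitnessOut_sID_to_sgrpID.1 ≠ pvDiffWitnessOut_sID_to_sgrpID.2
def Claim_exact_sID_to_sgrpID : Prop := ∀ (sID : String) (max_len : Int), Dom_sID_to_sgrpID sID max_len → D_sID_to_sgrpID sID max_len → sID_to_sgrpID sID max_len ≠ sID_to_sgrpID_alt sID max_len

-- ===== LEMMAS AND PROOFS =====

-- splitting filter at the first failure of p
theorem filter_eq_takeWhile_append {α : Type} (p : α → Bool) (l : List α) :
    l.filter p = l.takeWhile p ++ (l.dropWhile p).filter p := by
  induction l with
  | nil => simp
  | cons a t ih =>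
    by_cases h : p a = true
    · simp [h, ih]
    · simp [h]

-- every position strictly before the takeWhile frontier satisfies p
theorem p_of_lt_takeWhile {α : Type} (p : α → Bool) (l : List α) (j : Nat)
    (hj : j < (l.takeWhile p).length) (hl : j < l.length) : p l[j] = true := by
  have hpref := List.takeWhile_prefix (l := l) p
  have hget : (l.takeWhile p)[j] = l[j] := hpref.getElem hj
  have hmem : (l.takeWhile p)[j] ∈ l.takeWhile p := List.getElem_mem hj
  have := List.mem_takeWhile_imp hmem
  rwa [hget] at this

-- the character at the takeWhile frontier fails p
theorem p_at_takeWhile {α : Type} (p : α → Bool) (l : List α)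
    (h : (l.takeWhile p).length < l.length) : p (l[(l.takeWhile p).length]'h) = false := by
  induction l with
  | nil => simp at h
  | cons a t ih =>
    by_cases hp : p a = true
    · simp only [List.takeWhile_cons, hp, if_true, List.length_cons] at h ⊢
      have h' : (t.takeWhile p).length < t.length := by simpa using h
      simpa using ih h'
    · simp only [List.takeWhile_cons, hp, if_false, Bool.false_eq_true, List.length_nil] at h ⊢
      simpa [Bool.not_eq_true] using hp

-- membership in A's list of non-alpha indices
theorem mem_nonalpha_idx (l : List Char) (k : Int) :
    k ∈ (PySem.List.enumerate l).filterMap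
        (fun ni => if !(PySem.Chars.isalpha ni.2) then some ni.1 else none) ↔
      ∃ (j : Nat) (hj : j < l.length), k = (j : Int) ∧ PySem.Chars.isalpha l[j] = false := by
  simp only [List.mem_filterMap]
  constructor
  · rintro ⟨⟨n, c⟩, hmem, hval⟩
    rcases (PySem.List.mem_enumerate_iff l 0 (n, c)).1 hmem with ⟨j, hj, hp⟩
    simp only [Prod.mk.injEq] at hp
    obtain ⟨hn, hc⟩ := hp
    by_cases ha : PySem.Chars.isalpha c = true
    · simp [ha] at hval
    · simp [ha] at hval
      subst hval
      exact ⟨j, hj, by omega, by rw [← hc]; simpa using ha⟩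
  · rintro ⟨j, hj, rfl, hfalse⟩
    refine ⟨((j : Int), l[j]), ?_, ?_⟩
    · exact (PySem.List.mem_enumerate_iff l 0 ((j : Int), l[j])).2 ⟨j, hj, by simp⟩
    · simp [hfalse]

-- A's min-of-non-alpha-indices (with default len) is the takeWhile frontier
theorem maxalphakey_eq (l : List Char) :
    PySem.List.minD
      ((PySem.List.enumerate l).filterMap
        (fun ni => if !(PySem.Chars.isalpha ni.2) then some ni.1 else none))
      (fun n => n) (l.length : Int)
    = ((l.takeWhile PySem.Chars.isalpha).length : Int) := by
  set F := (PySem.List.enumerate l).filterMap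
      (fun ni => if !(PySem.Chars.isalpha ni.2) then some ni.1 else none) with hF
  set tw := (l.takeWhile PySem.Chars.isalpha).length with htw
  have htwle : tw ≤ l.length := (List.takeWhile_prefix _).length_le
  rcases hmin : PySem.List.min? F (fun n => n) with _ | m
  · -- F = [] : every character is alphabetic, A takes the default _len
    have hFe : F = [] := (PySem.List.min?_eq_none_iff F (fun n => n)).1 hmin
    have hall : ∀ (j : Nat) (hj : j < l.length), PySem.Chars.isalpha (l[j]'hj) = true := by
      intro j hj
      by_contra hcon
      have hj' : ((j : Int)) ∈ F :=
        (mem_nonalpha_idx l (j : Int)).2 ⟨j, hj, rfl, by simpa [Bool.not_eq_true] using hcon⟩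
      simp [hFe] at hj'
    have hlen : tw = l.length := by
      by_contra hne
      have hlt : tw < l.length := lt_of_le_of_ne htwle hne
      have hfalse := p_at_takeWhile PySem.Chars.isalpha l hlt
      rw [hall _ hlt] at hfalse
      exact absurd hfalse (by simp)
    simp [PySem.List.minD, hmin, hlen]
  · -- F nonempty : the minimum is the first non-alphabetic index = the takeWhile frontier
    obtain ⟨j, hj, hmj, hjfalse⟩ := (mem_nonalpha_idx l m).1 (PySem.List.min?_mem hmin)
    have hmin' := PySem.List.min?_isMin hmin
    have htwlt : tw < l.length := by
      by_contra hge
      have : tw = l.length := le_antisymm htwle (by omega)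
      have : PySem.Chars.isalpha (l[j]'hj) = true := p_of_lt_takeWhile _ l j (by omega) hj
      rw [hjfalse] at this
      exact absurd this (by simp)
    have htwmem : ((tw : Int)) ∈ F :=
      (mem_nonalpha_idx l (tw : Int)).2 ⟨tw, htwlt, rfl, p_at_takeWhile _ l htwlt⟩
    have h1 : m ≤ (tw : Int) := hmin' _ htwmem
    have h2 : tw ≤ j := by
      by_contra hlt
      have : PySem.Chars.isalpha (l[j]'hj) = true := p_of_lt_takeWhile _ l j (by omega) hj
      rw [hjfalse] at this
      exact absurd this (by simp)
    simp only [PySem.List.minD, hmin, Option.getD_some]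
    omega

-- both ports on a negative max_len, written over the common tail-trimmed slice
theorem ports_neg (sID : String) (m : Int) (hm : m < 0) :
    sID_to_sgrpID sID m
      = String.ofList ((sID.toList.take (sID.toList.length - m.natAbs)).filter PySem.Chars.isalpha)
    ∧ sID_to_sgrpID_alt sID m
      = String.ofList ((sID.toList.take (sID.toList.length - m.natAbs)).takeWhile PySem.Chars.isalpha) := by
  have hk : 0 < m.natAbs := by omega
  have hmsub : m = -((m.natAbs : Nat) : Int) := by omega
  have htwle : (sID.toList.takeWhile PySem.Chars.isalpha).length ≤ sID.toList.length :=
    (List.takeWhile_prefix _).length_le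
  constructor
  · unfold sID_to_sgrpID
    simp only [PySem.Str.len_eq, maxalphakey_eq, PySem.List.slice_zero_start]
    have hmk : min ((sID.toList.length : Int))
        (min (((sID.toList.takeWhile PySem.Chars.isalpha).length : Int)) m) = m := by omega
    rw [hmk, hmsub, PySem.List.slice_to_neg_natCast _ _ hk]
    simp only [Int.natAbs_neg, Int.natAbs_natCast]
  · unfold sID_to_sgrpID_alt
    rw [hmsub, PySem.List.slice_to_neg_natCast _ _ hk]
    simp only [Int.natAbs_neg, Int.natAbs_natCast]

-- ===== VERDICT (by name: the statement is the Claim_ definition above) =====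
theorem sID_to_sgrpID_spec : Claim_unchanged_sID_to_sgrpID := by
  intro sID m _hdom hnd
  by_cases hm : m < 0
  · -- negative max_len: outside D_ the slice has no letter after a non-letter,
    -- so A's filter over the slice equals B's takeWhile over the slice
    obtain ⟨hA, hB⟩ := ports_neg sID m hm
    rw [hA, hB]
    congr 1
    set s := sID.toList.take (sID.toList.length - m.natAbs) with hs
    have hany : (s.dropWhile PySem.Chars.isalpha).any PySem.Chars.isalpha = false := by
      by_contra hcon
      exact hnd ⟨hm, by simpa [Bool.not_eq_false] using hcon⟩
    have hnil : (s.dropWhile PySem.Chars.isalpha).filter PySem.Chars.isalpha = [] := by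
      rw [List.filter_eq_nil_iff]
      intro a ha
      simpa using List.any_eq_false.1 hany a ha
    rw [filter_eq_takeWhile_append, hnil, List.append_nil]
  · -- nonnegative max_len: both sides are the first min(tw, max_len) characters
    rw [not_lt] at hm
    unfold sID_to_sgrpID sID_to_sgrpID_alt
    simp only [PySem.Str.len_eq, maxalphakey_eq, PySem.List.slice_zero_start]
    set l := sID.toList with hl
    set tw := (l.takeWhile PySem.Chars.isalpha).length with htw
    have htwle : tw ≤ l.length := (List.takeWhile_prefix _).length_le
    have hmk : min ((l.length : Int)) (min ((tw : Int)) m) = min ((tw : Int)) m := by omega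
    have h0 : (0 : Int) ≤ min ((tw : Int)) m := by omega
    rw [hmk, PySem.List.slice_to _ h0, PySem.List.slice_to _ hm]
    have htn : (min ((tw : Int)) m).toNat = min tw m.toNat := by omega
    rw [htn]
    congr 1
    have hfil : (l.take (min tw m.toNat)).filter PySem.Chars.isalpha = l.take (min tw m.toNat) := by
      rw [List.filter_eq_self]
      intro a ha
      obtain ⟨j, hj, rfl⟩ := List.mem_iff_getElem.1 ha
      rw [List.getElem_take]
      refine p_of_lt_takeWhile _ l j ?_ _
      simp at hj
      omega
    rw [hfil, List.take_takeWhile.symm, List.prefix_iff_eq_take.mp (List.takeWhile_prefix _),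
      ← htw, List.take_take]
    congr 1
    omega

theorem sID_to_sgrpID_changed : Claim_changed_sID_to_sgrpID := by
  unfold Claim_changed_sID_to_sgrpID; decide

theorem sID_to_sgrpID_tight : Claim_exact_sID_to_sgrpID := by
  intro sID m _hdom hd
  obtain ⟨hm, hany⟩ := hd
  obtain ⟨hA, hB⟩ := ports_neg sID m hm
  rw [hA, hB]
  intro heq
  have hlist := congrArg String.toList heq
  simp only [String.toList_ofList] at hlist
  rw [filter_eq_takeWhile_append] at hlist
  have hnil := List.append_right_eq_self.1 hlist
  obtain ⟨a, ha, hpa⟩ := List.any_eq_true.1 hany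
  rw [List.filter_eq_nil_iff] at hnil
  exact hnil a ha hpa
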